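-- pv_equiv track=rewrite | github.com/ALiljekvist/AoC2015 | day17/main.py | find_least_amount
-- ===== SOURCE A (Python) =====
-- AMOUNT = 150
--
-- def find_least_amount(containers, chosen):
--     if sum(chosen) == AMOUNT:
--         return len(chosen)
--     if sum(chosen) > AMOUNT:
--         return None
--     for i, val in enumerate(containers):
--         chosen.append(val)
--         res = find_least_amount(containers[i+1:], chosen)
--         if res is not None:
--             return res
--         chosen.pop()
--     return None
-- ===== SOURCE B (Python) =====
-- AMOUNT = 150
--
-- def find_least_amount(containers, chosen):
--     # Iterative DFS with an explicit stack of (start, total, depth) frames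
--     # (top at index 0); tracks the running sum and depth instead of
--     # re-summing the path at every node. Return value only: unlike the
--     # recursive original, it does not mutate `chosen`.
--     base = len(chosen)
--     stack = [(0, sum(chosen), 0)]
--     while stack:
--         (start, total, depth), stack = stack[0], stack[1:]
--         if total == AMOUNT:
--             return base + depth
--         if total > AMOUNT:
--             continue
--         stack = [(i + 1, total + containers[i], depth + 1)
--                  for i in range(start, len(containers))] + stack
--     return None
-- ===== Notes on version B (the rewrite author's own statement) =====
-- stated objective: alternative
-- what changed: Replaces A's recursive DFS (which re-sums the mutated `chosen` path at every node and slices the container list) by an iterative DFS over an explicit stack of (start index, running sum, depth) frames on the unmodified input list; B does not mutate `chosen` (return value equivalence).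
import Mathlib
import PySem

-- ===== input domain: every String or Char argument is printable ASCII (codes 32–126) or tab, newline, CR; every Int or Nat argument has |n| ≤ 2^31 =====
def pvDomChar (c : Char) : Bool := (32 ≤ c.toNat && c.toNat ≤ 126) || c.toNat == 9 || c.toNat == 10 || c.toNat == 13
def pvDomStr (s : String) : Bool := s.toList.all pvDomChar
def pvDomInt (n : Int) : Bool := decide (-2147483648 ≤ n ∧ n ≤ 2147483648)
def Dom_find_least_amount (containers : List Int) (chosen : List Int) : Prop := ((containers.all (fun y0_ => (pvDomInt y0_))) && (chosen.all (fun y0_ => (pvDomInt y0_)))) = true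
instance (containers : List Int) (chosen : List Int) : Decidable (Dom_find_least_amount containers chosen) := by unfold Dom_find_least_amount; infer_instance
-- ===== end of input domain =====

-- B replaces A's recursive DFS by an explicit-stack iterative DFS over
-- (start index, running sum, depth) frames; equivalence is about the RETURN
-- value only (A mutates `chosen` in place, B does not touch it).

-- ===== PORT A =====
-- A's `for i, val in enumerate(containers)` loop with the recursive call on the
-- slice `containers[i+1:]` is transcribed structurally: the loop body at position i
-- sees head v = containers[i] and the slice is exactly the tail.
mutual
def find_least_amount (containers : List Int) (chosen : List Int) : Option Int :=
  if chosen.sum = 150 then some (chosen.length : Int)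
  else if chosen.sum > 150 then none
  else fla_go containers chosen
termination_by (containers.length, 1)

def fla_go (rest : List Int) (chosen : List Int) : Option Int :=
  match rest with
  | [] => none
  | v :: t =>
    match find_least_amount t (chosen ++ [v]) with
    | some r => some r
    | none => fla_go t chosen
termination_by (rest.length, 0)
end

-- ===== PORT B =====
-- stack measure used for B's termination: each frame with start s over a list of
-- length n bounds its DFS subtree by 2^(n-s) nodes.
def fla_meas (n : Nat) (stack : List (Nat × Int × Int)) : Nat :=
  (stack.map (fun f => 2 ^ (n - f.1))).sum

-- geometric bound: the children frames of a popped frame weigh strictly less than it.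
theorem fla_geo (m : Nat) : ∀ s n : Nat, s + m ≤ n →
    ((List.range' s m).map (fun i => 2 ^ (n - (i + 1)))).sum < 2 ^ (n - s) := by
  induction m with
  | zero => intro s n _; simp
  | succ m ih =>
    intro s n h
    rw [List.range'_succ, List.map_cons, List.sum_cons]
    have hs : s < n := by omega
    have h2 : s + 1 + m ≤ n := by omega
    have := ih (s + 1) n h2
    have hpow : 2 ^ (n - s) = 2 ^ (n - (s + 1)) + 2 ^ (n - (s + 1)) := by
      have : n - s = (n - (s + 1)) + 1 := by omega
      rw [this, pow_succ]; omega
    omega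

-- the list of children frames pushed when frame (s, t, d) is expanded
def fla_frames (containers : List Int) (s : Nat) (t d : Int) : List (Nat × Int × Int) :=
  (List.range' s (containers.length - s)).map
    (fun i => (i + 1, t + containers.getD i 0, d + 1))

theorem fla_meas_frames_lt (containers : List Int) (s : Nat) (t d : Int)
    (rest : List (Nat × Int × Int)) :
    fla_meas containers.length (fla_frames containers s t d ++ rest) <
      fla_meas containers.length ((s, t, d) :: rest) := by
  have hframes : fla_meas containers.length (fla_frames containers s t d) <
      2 ^ (containers.length - s) := by
    by_cases hle : s ≤ containers.length
    · have h : s + (containers.length - s) ≤ containers.length := by omega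
      have := fla_geo (containers.length - s) s containers.length h
      simpa [fla_meas, fla_frames, Function.comp] using this
    · have : containers.length - s = 0 := by omega
      simp [fla_meas, fla_frames, this]
  have happ : fla_meas containers.length (fla_frames containers s t d ++ rest) =
      fla_meas containers.length (fla_frames containers s t d) +
      fla_meas containers.length rest := by
    simp [fla_meas]
  have hcons : fla_meas containers.length ((s, t, d) :: rest) =
      2 ^ (containers.length - s) + fla_meas containers.length rest := by
    simp [fla_meas]
  omega

def fla_run (containers : List Int) (base : Int)
    (stack : List (Nat × Int × Int)) : Option Int :=
  match stack with
  | [] => none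
  | (s, t, d) :: rest =>
    if t = 150 then some (base + d)
    else if t > 150 then fla_run containers base rest
    else fla_run containers base (fla_frames containers s t d ++ rest)
termination_by fla_meas containers.length stack
decreasing_by
  · have h : 0 < 2 ^ (containers.length - s) := Nat.two_pow_pos _
    simp only [fla_meas, List.map_cons, List.sum_cons]
    omega
  · exact fla_meas_frames_lt containers s t d rest

def find_least_amount_alt (containers : List Int) (chosen : List Int) : Option Int :=
  fla_run containers (chosen.length : Int) [(0, chosen.sum, 0)]

-- ===== PRECONDITION & SPEC =====
def Spec_find_least_amount (containers : List Int) (chosen : List Int) (out : Option Int) : Prop := out = find_least_amount_alt containers chosen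
instance (containers : List Int) (chosen : List Int) (out : Option Int) : Decidable (Spec_find_least_amount containers chosen out) := by unfold Spec_find_least_amount; infer_instance

-- ===== CLAIM (what is proved, stated in full; the proofs are below) =====
def Claim_equal_find_least_amount : Prop := ∀ (containers : List Int) (chosen : List Int), Dom_find_least_amount containers chosen → Spec_find_least_amount containers chosen (find_least_amount containers chosen)

-- ===== LEMMAS AND PROOFS =====

-- A's result depends on `chosen` only through its sum and length: the mirror F/G.
mutual
def Fspec (C : List Int) (t l : Int) : Option Int :=
  if t = 150 then some l
  else if t > 150 then none
  else Gspec C t l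
termination_by (C.length, 1)

def Gspec (C : List Int) (t l : Int) : Option Int :=
  match C with
  | [] => none
  | v :: tail =>
    match Fspec tail (t + v) (l + 1) with
    | some r => some r
    | none => Gspec tail t l
termination_by (C.length, 0)
end

theorem A_eq_FG : ∀ (N : Nat) (C : List Int), C.length ≤ N → ∀ ch : List Int,
    fla_go C ch = Gspec C ch.sum (ch.length : Int) ∧
    find_least_amount C ch = Fspec C ch.sum (ch.length : Int) := by
  intro N
  induction N with
  | zero =>
    intro C hC ch
    have hC0 : C = [] := List.length_eq_zero_iff.mp (Nat.le_zero.mp hC)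
    subst hC0
    constructor
    · simp [fla_go, Gspec]
    · rw [find_least_amount, Fspec]
      simp [fla_go, Gspec]
  | succ N ih =>
    intro C hC ch
    have hgo : fla_go C ch = Gspec C ch.sum (ch.length : Int) := by
      cases C with
      | nil => simp [fla_go, Gspec]
      | cons v t =>
        have ht : t.length ≤ N := by simp at hC; omega
        have h1 := (ih t ht (ch ++ [v])).2
        have h2 := (ih t ht ch).1
        rw [fla_go, Gspec]
        have hsum : (ch ++ [v]).sum = ch.sum + v := by simp
        have hlen : ((ch ++ [v]).length : Int) = (ch.length : Int) + 1 := by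
          simp
        rw [h1, hsum, hlen, h2]
    refine ⟨hgo, ?_⟩
    rw [find_least_amount, Fspec, hgo]

-- the meaning of a whole stack: first success among its frames' subtrees
def Hlist (containers : List Int) (base : Int) : List (Nat × Int × Int) → Option Int
  | [] => none
  | (s, t, d) :: rest =>
    match Fspec (containers.drop s) t (base + d) with
    | some r => some r
    | none => Hlist containers base rest

theorem Hlist_append (containers : List Int) (base : Int)
    (a b : List (Nat × Int × Int)) :
    Hlist containers base (a ++ b) =
      match Hlist containers base a with
      | some v => some v
      | none => Hlist containers base b := by
  induction a with
  | nil => simp [Hlist]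
  | cons f r ih =>
    obtain ⟨s, t, d⟩ := f
    rw [List.cons_append, Hlist, Hlist, ih]
    cases Fspec (containers.drop s) t (base + d) <;> simp

theorem Hlist_frames (containers : List Int) (base : Int) :
    ∀ (m s : Nat) (t d : Int), containers.length - s = m →
    Hlist containers base (fla_frames containers s t d) =
      Gspec (containers.drop s) t (base + d) := by
  intro m
  induction m with
  | zero =>
    intro s t d hm
    have hdrop : containers.drop s = [] :=
      List.drop_eq_nil_of_le (by omega)
    simp [fla_frames, hm, Hlist, hdrop, Gspec]
  | succ m ih =>
    intro s t d hm
    have hs : s < containers.length := by omega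
    have hdrop : containers.drop s = containers[s] :: containers.drop (s + 1) :=
      List.drop_eq_getElem_cons hs
    have hgetD : containers.getD s 0 = containers[s] := List.getD_eq_getElem _ _ hs
    have htail : containers.length - (s + 1) = m := by omega
    rw [fla_frames, hm, List.range'_succ, List.map_cons, Hlist]
    have hrest : (List.range' (s + 1) m).map
        (fun i => (i + 1, t + containers.getD i 0, d + 1)) =
        fla_frames containers (s + 1) t d := by
      rw [fla_frames, htail]
    rw [hrest, ih (s + 1) t d htail, hdrop, Gspec, hgetD]
    have hadd : base + d + 1 = base + (d + 1) := by ring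
    rw [hadd]

theorem run_eq_Hlist (containers : List Int) (base : Int) :
    ∀ (k : Nat) (stack : List (Nat × Int × Int)),
      fla_meas containers.length stack ≤ k →
      fla_run containers base stack = Hlist containers base stack := by
  intro k
  induction k with
  | zero =>
    intro stack hk
    cases stack with
    | nil => simp [fla_run, Hlist]
    | cons f r =>
      exfalso
      have : 0 < 2 ^ (containers.length - f.1) := Nat.two_pow_pos _
      simp [fla_meas] at hk
  | succ k ih =>
    intro stack hk
    cases stack with
    | nil => simp [fla_run, Hlist]
    | cons f rest =>
      obtain ⟨s, t, d⟩ := f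
      have hcons : fla_meas containers.length ((s, t, d) :: rest) =
          2 ^ (containers.length - s) + fla_meas containers.length rest := by
        simp [fla_meas]
      have hpos : 0 < 2 ^ (containers.length - s) := Nat.two_pow_pos _
      rw [fla_run, Hlist]
      by_cases h150 : t = 150
      · simp [h150, Fspec]
      · by_cases hgt : t > 150
        · have hrest : fla_meas containers.length rest ≤ k := by omega
          rw [if_neg h150, if_pos hgt, ih rest hrest]
          rw [Fspec, if_neg h150, if_pos hgt]
        · have hlt := fla_meas_frames_lt containers s t d rest
          have hle : fla_meas containers.length
              (fla_frames containers s t d ++ rest) ≤ k := by omega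
          rw [if_neg h150, if_neg hgt, ih _ hle, Hlist_append,
            Hlist_frames containers base (containers.length - s) s t d rfl]
          rw [Fspec, if_neg h150, if_neg hgt]
  -- both sides now match on `Gspec (containers.drop s) t (base + d)`

-- ===== VERDICT (by name: the statement is the Claim_ definition above) =====
theorem find_least_amount_spec : Claim_equal_find_least_amount := by
  intro containers chosen _
  unfold Spec_find_least_amount find_least_amount_alt
  rw [run_eq_Hlist containers (chosen.length : Int)
      (fla_meas containers.length [(0, chosen.sum, 0)]) _ le_rfl]
  rw [Hlist]
  have h := (A_eq_FG containers.length containers le_rfl chosen).2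
  rw [List.drop_zero, add_zero, ← h]
  cases find_least_amount containers chosen <;> simp [Hlist]
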